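-- pv_equiv track=rewrite | github.com/codatta/symphony | symphony/tools/linear_graphql.py | _graphql_tokens
-- ===== SOURCE A (Python) =====
-- def _graphql_tokens(query: str):
--     index = 0
--     length = len(query)
--
--     while index < length:
--         char = query[index]
--
--         if char.isspace() or char == ",":
--             index += 1
--             continue
--
--         if char == "#":
--             index = _skip_line_comment(query, index + 1)
--             continue
--
--         if query.startswith('"""', index):
--             index = _skip_block_string(query, index + 3)
--             continue
--
--         if char == '"':
--             index = _skip_string(query, index + 1)
--             continue
--
--         if char in "{}":
--             yield char
--             index += 1
--             continue
--
--         if char.isalpha() or char == "_":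
--             start = index
--             index += 1
--             while index < length and (query[index].isalnum() or query[index] == "_"):
--                 index += 1
--             yield query[start:index]
--             continue
--
--         index += 1
--
-- def _skip_line_comment(query: str, index: int) -> int:
--     while index < len(query) and query[index] not in "\r\n":
--         index += 1
--     return index
--
-- def _skip_string(query: str, index: int) -> int:
--     escaped = False
--     while index < len(query):
--         char = query[index]
--         index += 1
--         if escaped:
--             escaped = False
--             continue
--         if char == "\\":
--             escaped = True
--             continue
--         if char == '"':
--             break
--     return index
--
-- def _skip_block_string(query: str, index: int) -> int:
--     while index < len(query):
--         if query.startswith('\\"""', index):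
--             index += 4
--             continue
--         if query.startswith('"""', index):
--             return index + 3
--         index += 1
--     return len(query)
-- ===== SOURCE B (Python) =====
-- def _graphql_tokens(query: str):
--     # One-pass character state machine (mode + identifier buffer) instead of
--     # index-jumping sub-scanners.
--     state = "normal"
--     q = 0       # consecutive quotes seen inside a block string / after '\'
--     buf = ""    # current identifier
--     for ch in query:
--         if state == "ident":
--             if ch.isalnum() or ch == "_":
--                 buf += ch
--                 continue
--             yield buf
--             state = "normal"
--         if state == "q2":
--             if ch == '"':
--                 state, q = "blk", 0
--                 continue
--             state = "normal"  # the empty string "" just closed; ch is next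
--         if state == "normal":
--             if ch == '"':
--                 state = "q1"
--             elif ch == "#":
--                 state = "comment"
--             elif ch in "{}":
--                 yield ch
--             elif ch.isalpha() or ch == "_":
--                 state, buf = "ident", ch
--             # whitespace, comma and any other char: ignored
--         elif state == "q1":
--             if ch == '"':
--                 state = "q2"
--             elif ch == "\\":
--                 state = "str_esc"
--             else:
--                 state = "str"
--         elif state == "str":
--             if ch == "\\":
--                 state = "str_esc"
--             elif ch == '"':
--                 state = "normal"
--         elif state == "str_esc":
--             state = "str"
--         elif state == "comment":
--             if ch in "\r\n":
--                 state = "normal"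
--         elif state == "blk":
--             if ch == '"':
--                 q += 1
--                 if q == 3:
--                     state, q = "normal", 0
--             elif ch == "\\":
--                 state, q = "blk_esc", 0
--             else:
--                 q = 0
--         elif state == "blk_esc":
--             if ch == '"':
--                 q += 1
--                 if q == 3:
--                     state, q = "blk", 0
--             elif ch == "\\":
--                 q = 0
--             else:
--                 state, q = "blk", 0
--     if state == "ident":
--         yield buf
-- ===== Notes on version B (the rewrite author's own statement) =====
-- stated objective: alternative
-- what changed: Replaced A's index-jumping scanner (while-loop with helper sub-scanners _skip_line_comment/_skip_string/_skip_block_string and startswith lookahead) by a single one-pass character-at-a-time state machine with an explicit mode (normal/string/escape/comment/block-string quote counter) and identifier buffer.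
import Mathlib
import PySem

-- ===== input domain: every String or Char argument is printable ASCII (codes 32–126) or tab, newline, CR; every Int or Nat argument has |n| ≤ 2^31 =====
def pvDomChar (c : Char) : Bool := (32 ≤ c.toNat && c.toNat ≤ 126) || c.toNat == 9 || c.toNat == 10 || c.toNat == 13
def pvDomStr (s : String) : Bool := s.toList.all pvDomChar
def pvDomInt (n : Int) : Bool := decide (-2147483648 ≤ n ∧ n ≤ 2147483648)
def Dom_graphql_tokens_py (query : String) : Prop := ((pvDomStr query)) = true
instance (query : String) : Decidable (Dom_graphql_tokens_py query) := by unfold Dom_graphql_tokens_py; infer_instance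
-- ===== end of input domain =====

-- B replaces A's index-jumping scanner (helper sub-scanners + lookahead) by a
-- single one-pass character state machine; objective: alternative structure.


-- ===== PORT A =====
-- A walks (query, index), only ever moving forward; the port carries the suffix
-- query[index:] as the loop state (each helper returns the remaining suffix).

def pvIsIdent (c : Char) : Bool := PySem.Chars.isalnum c || c = '_'

-- _skip_line_comment: stops AT the '\r'/'\n' (returned suffix keeps it)
def pvSkipLineComment : List Char → List Char
  | [] => []
  | c :: rest => if c = '\r' ∨ c = '\n' then c :: rest else pvSkipLineComment rest

def pvSkipString : Bool → List Char → List Char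
  | _, [] => []
  | escaped, c :: rest =>
    if escaped then pvSkipString false rest
    else if c = '\\' then pvSkipString true rest
    else if c = '"' then rest
    else pvSkipString false rest

def pvSkipBlock : List Char → List Char
  | '\\' :: '"' :: '"' :: '"' :: rest => pvSkipBlock rest
  | '"' :: '"' :: '"' :: rest => rest
  | _ :: rest => pvSkipBlock rest
  | [] => []

theorem pvSkipLineComment_len : ∀ l : List Char, (pvSkipLineComment l).length ≤ l.length := by
  intro l; induction l with
  | nil => simp [pvSkipLineComment]
  | cons c rest ih =>
    simp only [pvSkipLineComment]; split
    · simp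
    · exact Nat.le_trans ih (Nat.le_succ _)

theorem pvSkipString_len : ∀ (e : Bool) (l : List Char), (pvSkipString e l).length ≤ l.length := by
  intro e l; induction l generalizing e with
  | nil => simp [pvSkipString]
  | cons c rest ih =>
    simp only [pvSkipString]
    split_ifs <;> first
      | exact Nat.le_trans (ih _) (Nat.le_succ _)
      | exact Nat.le_succ _

theorem pvSkipBlock_len : ∀ l : List Char, (pvSkipBlock l).length ≤ l.length := by
  intro l
  induction l using pvSkipBlock.induct with
  | case1 rest ih =>
    calc (pvSkipBlock ('\\'::'"'::'"'::'"'::rest)).length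
        = (pvSkipBlock rest).length := by simp [pvSkipBlock]
      _ ≤ rest.length := ih
      _ ≤ _ := by simp; omega
  | case2 rest => simp [pvSkipBlock]; omega
  | case3 c rest h1 h2 ih =>
    have h : pvSkipBlock (c :: rest) = pvSkipBlock rest := by
      rw [pvSkipBlock.eq_def]; split
      · rename_i heq; injection heq with e1 e2; exact (h1 _ e1 e2).elim
      · rename_i heq; injection heq with e1 e2; exact (h2 _ e1 e2).elim
      · rename_i heq; cases heq; rfl
      · simp_all
    rw [h]; exact Nat.le_trans ih (Nat.le_succ _)
  | case4 => simp [pvSkipBlock]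

def pvTokA : List Char → List String
  | [] => []
  | c :: rest =>
    if PySem.Chars.isspace c ∨ c = ',' then pvTokA rest
    else if c = '#' then pvTokA (pvSkipLineComment rest)
    else if c = '"' then
      -- query.startswith('"""', index) (only reachable when char = '"')
      match rest with
      | '"' :: '"' :: t => pvTokA (pvSkipBlock t)
      | r => pvTokA (pvSkipString false r)
    else if c = '{' ∨ c = '}' then String.ofList [c] :: pvTokA rest
    else if PySem.Chars.isalpha c ∨ c = '_' then
      -- the inner identifier while-loop: advance while isalnum or '_'
      String.ofList (c :: rest.takeWhile pvIsIdent) :: pvTokA (rest.dropWhile pvIsIdent)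
    else pvTokA rest
termination_by l => l.length
decreasing_by
  · simp
  · have := pvSkipLineComment_len rest; simp; omega
  · have := pvSkipBlock_len t; simp; omega
  · have := pvSkipString_len false r; simp; omega
  · simp
  · have := List.length_dropWhile_le pvIsIdent rest; simp; omega
  · simp

def graphql_tokens_py (query : String) : List String := pvTokA query.toList

-- ===== PORT B =====
-- the state machine of Source B: one constructor per mode, identifier buffer in the state
inductive PvSt where
  | normal | comment | q1 | q2 | strEsc | str
  | blk (q : Nat)
  | blkEsc (k : Nat)
  | ident (buf : List Char)
deriving DecidableEq, Repr

def pvIsIdentB (c : Char) : Bool := PySem.Chars.isalnum c || c = '_'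

-- the `state == "normal"` branch of Source B's loop body
def pvStepNormal (ch : Char) : PvSt × List String :=
  if ch = '"' then (.q1, [])
  else if ch = '#' then (.comment, [])
  else if ch = '{' ∨ ch = '}' then (.normal, [String.ofList [ch]])
  else if PySem.Chars.isalpha ch ∨ ch = '_' then (.ident [ch], [])
  else (.normal, [])

-- one iteration of Source B's for-loop (fall-through from ident/q2 to normal included)
def pvStep (s : PvSt) (ch : Char) : PvSt × List String :=
  match s with
  | .ident buf =>
    if pvIsIdentB ch then (.ident (buf ++ [ch]), [])
    else
      let (s', out) := pvStepNormal ch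
      (s', String.ofList buf :: out)
  | .q2 => if ch = '"' then (.blk 0, []) else pvStepNormal ch
  | .normal => pvStepNormal ch
  | .q1 =>
    if ch = '"' then (.q2, [])
    else if ch = '\\' then (.strEsc, [])
    else (.str, [])
  | .str =>
    if ch = '\\' then (.strEsc, [])
    else if ch = '"' then (.normal, [])
    else (.str, [])
  | .strEsc => (.str, [])
  | .comment => if ch = '\r' ∨ ch = '\n' then (.normal, []) else (.comment, [])
  | .blk q =>
    if ch = '"' then (if q + 1 = 3 then (.normal, []) else (.blk (q + 1), []))
    else if ch = '\\' then (.blkEsc 0, [])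
    else (.blk 0, [])
  | .blkEsc k =>
    if ch = '"' then (if k + 1 = 3 then (.blk 0, []) else (.blkEsc (k + 1), []))
    else if ch = '\\' then (.blkEsc 0, [])
    else (.blk 0, [])

-- the final `if state == "ident": yield buf`
def pvFlush : PvSt → List String
  | .ident buf => [String.ofList buf]
  | _ => []

def graphql_tokens_py_alt (query : String) : List String :=
  let (s, out) := query.toList.foldl
    (fun (acc : PvSt × List String) ch =>
      let (s', e) := pvStep acc.1 ch
      (s', acc.2 ++ e)) (.normal, [])
  out ++ pvFlush s

-- ===== PRECONDITION & SPEC =====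
def Spec_graphql_tokens_py (query : String) (out : List String) : Prop := out = graphql_tokens_py_alt query
instance (query : String) (out : List String) : Decidable (Spec_graphql_tokens_py query out) := by unfold Spec_graphql_tokens_py; infer_instance

-- ===== CLAIM (what is proved, stated in full; the proofs are below) =====
def Claim_equal_graphql_tokens_py : Prop := ∀ (query : String), Dom_graphql_tokens_py query → Spec_graphql_tokens_py query (graphql_tokens_py query)

-- ===== LEMMAS AND PROOFS =====

theorem pvIsIdentB_eq : pvIsIdentB = pvIsIdent := rfl

theorem pv_char_le_toNat (c d : Char) : (c ≤ d) ↔ c.toNat ≤ d.toNat := ge_iff_le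
theorem pv_char_eq_toNat (c d : Char) : c = d ↔ c.toNat = d.toNat := eq_iff_eq_of_cmp_eq_cmp rfl

theorem pv_alpha_iff (c : Char) :
    PySem.Chars.isalpha c = true ↔ (65 ≤ c.toNat ∧ c.toNat ≤ 90) ∨ (97 ≤ c.toNat ∧ c.toNat ≤ 122) := by
  simp [PySem.Chars.isalpha, PySem.Chars.isupper, PySem.Chars.islower,
    pv_char_le_toNat c, pv_char_le_toNat _ c]

-- whitespace and ',' do nothing in state normal
theorem pvStepNormal_ws (c : Char) (h : PySem.Chars.isspace c = true ∨ c = ',') :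
    pvStepNormal c = (.normal, []) := by
  rcases h with h | h
  · simp only [PySem.Chars.isspace, Bool.or_eq_true, Bool.and_eq_true, decide_eq_true_eq] at h
    have halpha : ¬ PySem.Chars.isalpha c = true := by
      rw [pv_alpha_iff]; omega
    rw [pvStepNormal,
      if_neg (by rw [pv_char_eq_toNat]; intro hc; simp at hc; omega),
      if_neg (by rw [pv_char_eq_toNat]; intro hc; simp at hc; omega),
      if_neg (by
        rintro (hc | hc) <;> (rw [pv_char_eq_toNat] at hc; simp at hc; omega)),
      if_neg (by
        rintro (hc | hc)
        · exact halpha hc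
        · rw [pv_char_eq_toNat] at hc; simp at hc; omega)]
  · subst h; decide

-- tokens the machine still emits from state s over l (final flush included)
def pvRun (s : PvSt) : List Char → List String
  | [] => pvFlush s
  | c :: l => (pvStep s c).2 ++ pvRun (pvStep s c).1 l

theorem pvFoldl_run (l : List Char) : ∀ (s : PvSt) (acc : List String),
    (l.foldl
        (fun (a : PvSt × List String) ch =>
          let (s'', e) := pvStep a.1 ch
          (s'', a.2 ++ e)) (s, acc)).2
      ++ pvFlush (l.foldl
        (fun (a : PvSt × List String) ch =>
          let (s'', e) := pvStep a.1 ch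
          (s'', a.2 ++ e)) (s, acc)).1 = acc ++ pvRun s l := by
  induction l with
  | nil => intro s acc; simp [pvRun]
  | cons c l ih =>
    intro s acc
    simp only [List.foldl_cons, pvRun]
    exact (ih (pvStep s c).1 (acc ++ (pvStep s c).2)).trans (by rw [List.append_assoc])

theorem pvRun_comment (l : List Char) :
    pvRun .comment l = pvRun .normal (pvSkipLineComment l) := by
  induction l with
  | nil => simp [pvRun, pvSkipLineComment, pvFlush]
  | cons c l ih =>
    by_cases h : c = '\r' ∨ c = '\n'
    · have hn : pvStepNormal c = (.normal, []) := by
        rcases h with h | h <;> (subst h; decide)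
      simp [pvRun, pvStep, pvSkipLineComment, h, hn, ih]
    · simp [pvRun, pvStep, pvSkipLineComment, h, ih]

theorem pvRun_str (l : List Char) : ∀ e : Bool,
    pvRun (if e then .strEsc else .str) l = pvRun .normal (pvSkipString e l) := by
  induction l with
  | nil => intro e; cases e <;> simp [pvRun, pvSkipString, pvFlush]
  | cons c l ih =>
    intro e
    cases e with
    | true =>
      have h := ih false
      simp only [Bool.false_eq_true, if_false] at h
      simp only [if_true, pvRun, pvStep, pvSkipString]
      simpa using h
    | false =>
      by_cases hb : c = '\\'
      · have h := ih true
        simp only [if_true] at h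
        subst hb
        simp only [pvRun, pvStep, pvSkipString, if_true,
          if_neg (by decide : ¬('\\' = '"')), if_pos rfl]
        simpa using h
      · by_cases hq : c = '"'
        · subst hq
          simp [pvRun, pvStep, pvSkipString, hb]
        · have h := ih false
          simp only [Bool.false_eq_true, if_false] at h
          simp only [pvRun, pvStep, pvSkipString, if_neg hb, if_neg hq,
            Bool.false_eq_true, if_false]
          simpa using h

-- q2 ("" just closed) behaves like normal unless the next char is '"'
theorem pvRun_q2 (l : List Char) (h : ∀ t, l ≠ '"' :: t) :
    pvRun .q2 l = pvRun .normal l := by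
  cases l with
  | nil => simp [pvRun, pvFlush]
  | cons c l =>
    have hc : c ≠ '"' := fun hc => h l (by rw [hc])
    simp [pvRun, pvStep, hc]

-- a '"' that does not open a block string behaves like A's _skip_string
theorem pvRun_q1 (l : List Char) (h : ∀ t, l ≠ '"' :: '"' :: t) :
    pvRun .q1 l = pvRun .normal (pvSkipString false l) := by
  cases l with
  | nil => simp [pvRun, pvFlush, pvSkipString]
  | cons c rest =>
    by_cases hq : c = '"'
    · subst hq
      have h2 : ∀ t, rest ≠ '"' :: t := fun t ht => h t (by rw [ht])
      have e1 : pvSkipString false ('"' :: rest) = rest := by simp [pvSkipString]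
      have e2 : pvRun .q1 ('"' :: rest) = pvRun .q2 rest := by simp [pvRun, pvStep]
      rw [e1, e2, pvRun_q2 rest h2]
    · by_cases hb : c = '\\'
      · subst hb
        have e1 : pvRun .q1 ('\\' :: rest) = pvRun .strEsc rest := by
          simp [pvRun, pvStep]
        have e2 : pvSkipString false ('\\' :: rest) = pvSkipString true rest := by
          simp [pvSkipString]
        rw [e1, e2]
        simpa using pvRun_str rest true
      · have e1 : pvRun .q1 (c :: rest) = pvRun .str rest := by
          simp [pvRun, pvStep, hq, hb]
        have e2 : pvSkipString false (c :: rest) = pvSkipString false rest := by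
          simp [pvSkipString, hq, hb]
        rw [e1, e2]
        simpa using pvRun_str rest false

theorem pvSkipBlock_esc (t : List Char) :
    pvSkipBlock ('\\' :: '"' :: '"' :: '"' :: t) = pvSkipBlock t := by
  simp [pvSkipBlock]

theorem pvSkipBlock_close (t : List Char) :
    pvSkipBlock ('"' :: '"' :: '"' :: t) = t := by
  simp [pvSkipBlock]

theorem pvSkipBlock_cons (c : Char) (l : List Char)
    (h1 : ∀ t, c :: l ≠ '\\' :: '"' :: '"' :: '"' :: t)
    (h2 : ∀ t, c :: l ≠ '"' :: '"' :: '"' :: t) :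
    pvSkipBlock (c :: l) = pvSkipBlock l := by
  rw [pvSkipBlock.eq_def]; split
  · rename_i heq; exact absurd heq (h1 _)
  · rename_i heq; exact absurd heq (h2 _)
  · rename_i heq; cases heq; rfl
  · simp_all

-- block strings: .blk q matches A rescanning the q quotes already consumed,
-- .blkEsc k matches A still standing at a '\' followed by k quotes
theorem pvRun_blk : ∀ n, ∀ l : List Char, l.length ≤ n →
    (∀ q ≤ 2, pvRun (.blk q) l = pvRun .normal (pvSkipBlock (List.replicate q '"' ++ l))) ∧
    (∀ k ≤ 2, pvRun (.blkEsc k) l = pvRun .normal (pvSkipBlock ('\\' :: List.replicate k '"' ++ l))) := by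
  intro n
  induction n with
  | zero =>
    intro l hl
    have hnil : l = [] := List.length_eq_zero_iff.mp (Nat.le_zero.mp hl)
    subst hnil
    constructor
    · intro q hq; interval_cases q <;> decide
    · intro k hk; interval_cases k <;> decide
  | succ n ih =>
    intro l hl
    cases l with
    | nil => exact ih [] (by simp)
    | cons c l' =>
      have hl' : l'.length ≤ n := by simpa using hl
      have IH := ih l' hl'
      constructor
      · intro q hq
        by_cases hcq : c = '"'
        · subst hcq
          by_cases h3 : q + 1 = 3
          · have hq2 : q = 2 := by omega
            subst hq2
            have hstep : pvStep (.blk 2) '"' = (.normal, []) := by decide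
            simp only [pvRun, hstep]
            rw [show List.replicate 2 '"' ++ '"' :: l' = '"' :: '"' :: '"' :: l' from rfl,
              pvSkipBlock_close]
            simp
          · have hle : q + 1 ≤ 2 := by omega
            have hstep : pvStep (.blk q) '"' = (.blk (q + 1), []) := by
              simp [pvStep, h3]
            simp only [pvRun, hstep]
            rw [IH.1 (q + 1) hle]
            congr 2
            rw [List.replicate_succ']
            simp
        · by_cases hcb : c = '\\'
          · subst hcb
            have hstep : pvStep (.blk q) '\\' = (.blkEsc 0, []) := by simp [pvStep]
            simp only [pvRun, hstep]
            rw [IH.2 0 (by omega)]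
            congr 2
            interval_cases q
            · simp
            · rw [show List.replicate 1 '"' ++ '\\' :: l' = '"' :: '\\' :: l' from rfl,
                pvSkipBlock_cons '"' ('\\' :: l') (by simp) (by simp)]
              simp
            · rw [show List.replicate 2 '"' ++ '\\' :: l' = '"' :: '"' :: '\\' :: l' from rfl,
                pvSkipBlock_cons '"' ('"' :: '\\' :: l') (by simp) (by simp),
                pvSkipBlock_cons '"' ('\\' :: l') (by simp) (by simp)]
              simp
          · have hstep : pvStep (.blk q) c = (.blk 0, []) := by
              simp [pvStep, hcq, hcb]
            simp only [pvRun, hstep]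
            rw [IH.1 0 (by omega)]
            congr 2
            have hc1 : pvSkipBlock (c :: l') = pvSkipBlock l' :=
              pvSkipBlock_cons c l' (by simp [hcb]) (by simp [hcq])
            interval_cases q
            · simp [hc1]
            · rw [show List.replicate 1 '"' ++ c :: l' = '"' :: c :: l' from rfl,
                pvSkipBlock_cons '"' (c :: l') (by simp) (by simp [hcq])]
              simp [hc1]
            · rw [show List.replicate 2 '"' ++ c :: l' = '"' :: '"' :: c :: l' from rfl,
                pvSkipBlock_cons '"' ('"' :: c :: l') (by simp) (by simp [hcq]),
                pvSkipBlock_cons '"' (c :: l') (by simp) (by simp [hcq])]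
              simp [hc1]
      · intro k hk
        by_cases hcq : c = '"'
        · subst hcq
          by_cases h3 : k + 1 = 3
          · have hk2 : k = 2 := by omega
            subst hk2
            have hstep : pvStep (.blkEsc 2) '"' = (.blk 0, []) := by decide
            simp only [pvRun, hstep]
            rw [IH.1 0 (by omega)]
            rw [show '\\' :: List.replicate 2 '"' ++ '"' :: l' = '\\' :: '"' :: '"' :: '"' :: l' from rfl,
              pvSkipBlock_esc]
            simp
          · have hle : k + 1 ≤ 2 := by omega
            have hstep : pvStep (.blkEsc k) '"' = (.blkEsc (k + 1), []) := by
              simp [pvStep, h3]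
            simp only [pvRun, hstep]
            rw [IH.2 (k + 1) hle]
            congr 2
            rw [List.replicate_succ']
            simp
        · by_cases hcb : c = '\\'
          · subst hcb
            have hstep : pvStep (.blkEsc k) '\\' = (.blkEsc 0, []) := by simp [pvStep]
            simp only [pvRun, hstep]
            rw [IH.2 0 (by omega)]
            congr 2
            interval_cases k
            · rw [show '\\' :: List.replicate 0 '"' ++ '\\' :: l' = '\\' :: '\\' :: l' from rfl,
                pvSkipBlock_cons '\\' ('\\' :: l') (by simp) (by simp)]
              simp
            · rw [show '\\' :: List.replicate 1 '"' ++ '\\' :: l' = '\\' :: '"' :: '\\' :: l' from rfl,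
                pvSkipBlock_cons '\\' ('"' :: '\\' :: l') (by simp) (by simp),
                pvSkipBlock_cons '"' ('\\' :: l') (by simp) (by simp)]
              simp
            · rw [show '\\' :: List.replicate 2 '"' ++ '\\' :: l' = '\\' :: '"' :: '"' :: '\\' :: l' from rfl,
                pvSkipBlock_cons '\\' ('"' :: '"' :: '\\' :: l') (by simp) (by simp),
                pvSkipBlock_cons '"' ('"' :: '\\' :: l') (by simp) (by simp),
                pvSkipBlock_cons '"' ('\\' :: l') (by simp) (by simp)]
              simp
          · have hstep : pvStep (.blkEsc k) c = (.blk 0, []) := by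
              simp [pvStep, hcq, hcb]
            simp only [pvRun, hstep]
            rw [IH.1 0 (by omega)]
            congr 2
            have hc1 : pvSkipBlock (c :: l') = pvSkipBlock l' :=
              pvSkipBlock_cons c l' (by simp [hcb]) (by simp [hcq])
            interval_cases k
            · rw [show '\\' :: List.replicate 0 '"' ++ c :: l' = '\\' :: c :: l' from rfl,
                pvSkipBlock_cons '\\' (c :: l') (by simp [hcq]) (by simp)]
              simp [hc1]
            · rw [show '\\' :: List.replicate 1 '"' ++ c :: l' = '\\' :: '"' :: c :: l' from rfl,
                pvSkipBlock_cons '\\' ('"' :: c :: l') (by simp [hcq]) (by simp),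
                pvSkipBlock_cons '"' (c :: l') (by simp) (by simp [hcq])]
              simp [hc1]
            · rw [show '\\' :: List.replicate 2 '"' ++ c :: l' = '\\' :: '"' :: '"' :: c :: l' from rfl,
                pvSkipBlock_cons '\\' ('"' :: '"' :: c :: l') (by simp [hcq]) (by simp),
                pvSkipBlock_cons '"' ('"' :: c :: l') (by simp) (by simp [hcq]),
                pvSkipBlock_cons '"' (c :: l') (by simp) (by simp [hcq])]
              simp [hc1]

theorem pvRun_ident (l : List Char) : ∀ buf : List Char,
    pvRun (.ident buf) l =
      String.ofList (buf ++ l.takeWhile pvIsIdent) :: pvRun .normal (l.dropWhile pvIsIdent) := by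
  induction l with
  | nil => intro buf; simp [pvRun, pvFlush]
  | cons c l ih =>
    intro buf
    by_cases h : pvIsIdent c
    · simp [pvRun, pvStep, pvIsIdentB_eq, h, List.takeWhile_cons, List.dropWhile_cons, ih]
    · simp only [List.takeWhile_cons, List.dropWhile_cons, h, if_false, Bool.false_eq_true]
      have hstep : pvStep (.ident buf) c =
          ((pvStepNormal c).1, String.ofList buf :: (pvStepNormal c).2) := by
        simp [pvStep, pvIsIdentB_eq, h]
      simp only [pvRun, hstep]
      simp [pvRun, pvStep]

theorem pvTokA_eq_run : ∀ n, ∀ l : List Char, l.length ≤ n → pvTokA l = pvRun .normal l := by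
  intro n
  induction n with
  | zero =>
    intro l hl
    have hnil : l = [] := List.length_eq_zero_iff.mp (Nat.le_zero.mp hl)
    subst hnil; rw [pvTokA.eq_def]; simp [pvRun, pvFlush]
  | succ n ih =>
    intro l hl
    cases l with
    | nil => rw [pvTokA.eq_def]; simp [pvRun, pvFlush]
    | cons c rest =>
      have hrest : rest.length ≤ n := by simpa using hl
      have hrun : pvRun .normal (c :: rest)
          = (pvStepNormal c).2 ++ pvRun (pvStepNormal c).1 rest := rfl
      rw [pvTokA.eq_def]
      dsimp only
      by_cases hws : PySem.Chars.isspace c = true ∨ c = ','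
      · rw [if_pos hws, hrun, pvStepNormal_ws c hws]
        simpa using ih rest hrest
      · rw [if_neg hws]
        by_cases hh : c = '#'
        · subst hh
          rw [if_pos rfl, hrun]
          rw [show pvStepNormal '#' = (.comment, []) from by decide]
          simp only [List.nil_append]
          rw [pvRun_comment]
          exact ih _ (le_trans (pvSkipLineComment_len rest) hrest)
        · rw [if_neg hh]
          by_cases hq : c = '"'
          · subst hq
            rw [if_pos rfl]
            split
            · rename_i t0 t
              have hB : pvRun .normal ('"' :: '"' :: '"' :: t) = pvRun (.blk 0) t := by
                simp [pvRun, pvStep, pvStepNormal]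
              rw [hB, (pvRun_blk t.length t le_rfl).1 0 (by omega)]
              simp only [List.replicate, List.nil_append]
              have ht : t.length ≤ n := by simp at hrest; omega
              exact ih _ (le_trans (pvSkipBlock_len t) ht)
            · rename_i hne
              have hB : pvRun .normal ('"' :: rest) = pvRun .q1 rest := by
                simp [pvRun, pvStep, pvStepNormal]
              have hne' : ∀ t, rest ≠ '"' :: '"' :: t := by
                intro t ht; exact hne t ht
              rw [hB, pvRun_q1 rest hne']
              exact ih _ (le_trans (pvSkipString_len false rest) hrest)
          · rw [if_neg hq]
            by_cases hbr : c = '{' ∨ c = '}'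
            · rw [if_pos hbr, hrun]
              have hn : pvStepNormal c = (.normal, [String.ofList [c]]) := by
                rcases hbr with h | h <;> (subst h; decide)
              rw [hn]
              simp only [List.cons_append, List.nil_append]
              rw [ih rest hrest]
            · rw [if_neg hbr]
              by_cases hal : PySem.Chars.isalpha c = true ∨ c = '_'
              · rw [if_pos hal, hrun]
                have hn : pvStepNormal c = (.ident [c], []) := by
                  unfold pvStepNormal
                  rw [if_neg hq, if_neg hh, if_neg hbr, if_pos hal]
                rw [hn]
                simp only [List.nil_append]
                rw [pvRun_ident rest [c]]
                simp only [List.cons_append, List.nil_append]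
                rw [ih _ (le_trans (List.length_dropWhile_le _ _) hrest)]
              · rw [if_neg hal, hrun]
                have hn : pvStepNormal c = (.normal, []) := by
                  unfold pvStepNormal
                  rw [if_neg hq, if_neg hh, if_neg hbr, if_neg hal]
                rw [hn]
                simpa using ih rest hrest

-- ===== VERDICT (by name: the statement is the Claim_ definition above) =====
theorem graphql_tokens_py_spec : Claim_equal_graphql_tokens_py := by
  intro query _
  unfold Spec_graphql_tokens_py graphql_tokens_py graphql_tokens_py_alt
  have h1 := pvFoldl_run query.toList .normal []
  have h2 := pvTokA_eq_run query.toList.length query.toList (le_refl _)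
  simp only [List.nil_append] at h1
  rw [h2, ← h1]
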